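-- pv_equiv track=rewrite | github.com/karvendhanm/DSA | numbers_in_pi.py | numbersInPiHelper
-- ===== SOURCE A (Python) =====
-- def numbersInPiHelper(pi, favNumbers, minSplits):
--     if pi in favNumbers:
--         return 0
--
--     if pi in minSplits:
--         return minSplits[pi]
--
--     if len(pi) == 1:
--         return 0 if pi in favNumbers else -1
--
--     for i in range(1, len(pi)):
--         prefix, suffix = pi[:i], pi[i:]
--         if prefix in favNumbers:
--             minSplits[suffix] = numbersInPiHelper(suffix, favNumbers, minSplits)
--             if minSplits[suffix] != -1:
--                 if pi in minSplits and minSplits[pi] != -1: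
--                     minSplits[pi] = min(minSplits[pi], minSplits[suffix] + 1)
--                 else:
--                     minSplits[pi] = minSplits[suffix] + 1
--             else:
--                 minSplits[pi] = minSplits[pi] if pi in minSplits else -1
--     return minSplits.get(pi, -1)
-- ===== SOURCE B (Python) =====
-- # Iterative bottom-up DP over suffix start positions (no recursion); computes the
-- # return value only and does not mutate the minSplits memo it is given.
-- def numbersInPiHelper(pi, favNumbers, minSplits):
--     fav = set(favNumbers)
--     n = len(pi)
--     cache = [0] * (n + 1)
--     for i in range(n, -1, -1):
--         suffix = pi[i:]
--         if suffix in fav: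
--             cache[i] = 0
--         elif suffix in minSplits:
--             cache[i] = minSplits[suffix]
--         else:
--             options = [cache[j] + 1 for j in range(i + 1, n)
--                        if pi[i:j] in fav and cache[j] != -1]
--             cache[i] = min(options, default=-1)
--     return cache[0]
-- ===== Notes on version B (the rewrite author's own statement) =====
-- stated objective: alternative
-- what changed: A's memoized top-down recursion (threading and mutating the minSplits dict) is replaced by an iterative bottom-up DP that fills a cache over suffix start positions and takes min(options, default=-1) at each position; Pre_ excludes memo dicts that assign a value below -1 to a nonempty proper suffix of pi, where such convention-breaking entries (-1 means impossible, otherwise a count >= 0) can make A's -1-sentinel bookkeeping and B's plain min disagree.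
-- outside the precondition, e.g. on numbersInPiHelper('abc', {'c', 'a', 'ab'}, {'bc': -2}): A returns 1, B returns -1
import Mathlib
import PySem

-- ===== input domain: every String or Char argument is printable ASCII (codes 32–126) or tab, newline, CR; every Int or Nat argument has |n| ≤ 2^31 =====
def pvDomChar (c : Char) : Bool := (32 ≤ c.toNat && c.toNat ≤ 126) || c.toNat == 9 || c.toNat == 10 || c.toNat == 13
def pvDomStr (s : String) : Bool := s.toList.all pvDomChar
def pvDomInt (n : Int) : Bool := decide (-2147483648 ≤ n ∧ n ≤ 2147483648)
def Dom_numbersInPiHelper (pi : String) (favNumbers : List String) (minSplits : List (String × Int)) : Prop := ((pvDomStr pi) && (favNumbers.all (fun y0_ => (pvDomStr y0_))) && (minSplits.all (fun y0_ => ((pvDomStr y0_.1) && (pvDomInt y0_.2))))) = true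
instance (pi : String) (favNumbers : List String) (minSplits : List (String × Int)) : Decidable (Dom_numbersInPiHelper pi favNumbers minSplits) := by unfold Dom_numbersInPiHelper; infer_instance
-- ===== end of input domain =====

-- B replaces A's memoized top-down recursion by an iterative bottom-up DP over suffix start
-- positions; the equivalence is about the RETURN value only (the Python A mutates its
-- minSplits dict argument, B does not).

-- ===== PORT A =====
-- A's recursion, transliterated: the string is carried as List Char, dict keys as String
-- (String.ofList).  The call depth is bounded by len(pi), so the recursion is driven by a fuel
-- counter that starts at len(pi)+1 and never runs out (the 0 case is a totality guard only).
-- 'for i in range(1, len(pi))' is a foldl over PySem.List.pyRange threading the mutated dict;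
-- pi[:i] / pi[i:] are PySem.List.slice; 'm1.getD (…) 0' reads minSplits[suffix] just after it
-- was written (the key is present, so getD is exact there).
def pvCallA : Nat → List String → List Char → PySem.Dict String Int → Int × PySem.Dict String Int
  | 0, _, _, m => (-1, m)
  | fuel + 1, fav, pi, m =>
    if fav.contains (String.ofList pi) then (0, m)
    else
      match m.get? (String.ofList pi) with
      | some v => (v, m)
      | none =>
        if pi.length = 1 then ((if fav.contains (String.ofList pi) then 0 else -1), m)
        else
          let m' := (PySem.List.pyRange 1 (PySem.List.len pi) 1).foldl (fun m i =>
            if fav.contains (String.ofList (PySem.List.slice pi none (some i))) then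
              let r := pvCallA fuel fav (PySem.List.slice pi (some i) none) m
              let m1 := r.2.insert (String.ofList (PySem.List.slice pi (some i) none)) r.1
              let t := m1.getD (String.ofList (PySem.List.slice pi (some i) none)) 0
              if t ≠ -1 then
                match m1.get? (String.ofList pi) with
                | some v => if v ≠ -1 then m1.insert (String.ofList pi) (min v (t + 1))
                            else m1.insert (String.ofList pi) (t + 1)
                | none => m1.insert (String.ofList pi) (t + 1)
              else
                match m1.get? (String.ofList pi) with
                | some v => m1.insert (String.ofList pi) v
                | none => m1.insert (String.ofList pi) (-1)
            else m) m
          (m'.getD (String.ofList pi) (-1), m')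

def numbersInPiHelper (pi : String) (favNumbers : List String) (minSplits : List (String × Int)) : Int :=
  (pvCallA (pi.toList.length + 1) favNumbers pi.toList (PySem.Dict.mk minSplits)).1

-- ===== PORT B =====
-- Source B: iterative bottom-up DP.  pvBVal is the body of 'for i in range(n, -1, -1)' computing
-- cache[i] for the suffix starting at position i; the cache is carried as the list of the
-- already-filled entries cache[i+1..n] (Python pre-allocates the array instead), so Python's
-- cache[j] is cache[k]? with k = j-i-1; the comprehension is a filterMap over the same range,
-- min(options, default=-1) is List.min? + getD.  pvBBuild is the loop itself, prepending each
-- new entry; 'cache[0]' at the end is headD (the list is never empty there).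
def pvBVal (fav : PySem.Set String) (m0 : PySem.Dict String Int) (s : List Char) (cache : List Int) : Int :=
  if PySem.Set.contains fav (String.ofList s) then 0
  else
    match m0.get? (String.ofList s) with
    | some v => v
    | none =>
      let options := (List.range (s.length - 1)).filterMap (fun k =>
        match cache[k]? with
        | some t =>
          if PySem.Set.contains fav (String.ofList (s.take (k + 1))) && (t != -1)
          then some (t + 1) else none
        | none => none)
      options.min?.getD (-1)

def pvBBuild (fav : PySem.Set String) (m0 : PySem.Dict String Int) (l : List Char) : Nat → List Int → List Int
  | 0, cache => cache
  | k + 1, cache => pvBBuild fav m0 l k (pvBVal fav m0 (l.drop k) cache :: cache)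

def numbersInPiHelper_alt (pi : String) (favNumbers : List String) (minSplits : List (String × Int)) : Int :=
  (pvBBuild (PySem.Set.ofList favNumbers) (PySem.Dict.mk minSplits) pi.toList (pi.toList.length + 1) []).headD 0

-- ===== PRECONDITION & SPEC =====
-- Pre_ excludes memo dicts that assign a value below -1 to a nonempty proper suffix of pi:
-- such entries break the memo's convention (-1 means impossible, otherwise a split count ≥ 0),
-- and on them A's -1-sentinel bookkeeping and B's plain min can disagree accidentally.
def Pre_numbersInPiHelper (pi : String) (favNumbers : List String) (minSplits : List (String × Int)) : Prop :=
  ∀ p ∈ minSplits, p.1.toList ≠ [] → p.1.toList.length < pi.toList.length →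
    p.1.toList <:+ pi.toList → -1 ≤ p.2
instance (pi : String) (favNumbers : List String) (minSplits : List (String × Int)) : Decidable (Pre_numbersInPiHelper pi favNumbers minSplits) := by unfold Pre_numbersInPiHelper; infer_instance

def pvWitness_numbersInPiHelper : String × List String × (List (String × Int)) :=
  ("3141", ["3", "14", "1"], [("41", 2)])

def Spec_numbersInPiHelper (pi : String) (favNumbers : List String) (minSplits : List (String × Int)) (out : Int) : Prop := out = numbersInPiHelper_alt pi favNumbers minSplits
instance (pi : String) (favNumbers : List String) (minSplits : List (String × Int)) (out : Int) : Decidable (Spec_numbersInPiHelper pi favNumbers minSplits out) := by unfold Spec_numbersInPiHelper; infer_instance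

-- ===== CLAIM (what is proved, stated in full; the proofs are below) =====
def Claim_equal_numbersInPiHelper : Prop := ∀ (pi : String) (favNumbers : List String) (minSplits : List (String × Int)), Dom_numbersInPiHelper pi favNumbers minSplits → Pre_numbersInPiHelper pi favNumbers minSplits → Spec_numbersInPiHelper pi favNumbers minSplits (numbersInPiHelper pi favNumbers minSplits)

-- ===== LEMMAS AND PROOFS =====

-- Proof-side specification: the value A computes for a suffix, as a pure fuelled recursion.
-- pvComb is the accumulator update A's loop performs.
def pvComb (best : Option Int) (t : Int) : Option Int :=
  if t ≠ -1 then
    match best with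
    | some v => if v ≠ -1 then some (min v (t + 1)) else some (t + 1)
    | none => some (t + 1)
  else
    match best with
    | some v => some v
    | none => some (-1)

mutual
def pvF (fav : List String) (m0 : PySem.Dict String Int) : Nat → List Char → Int
  | 0, _ => -1
  | fuel + 1, s =>
    if fav.contains (String.ofList s) then 0
    else
      match m0.get? (String.ofList s) with
      | some v => v
      | none =>
        if s.length = 1 then -1
        else (pvFLoop fav m0 fuel s 1 none).getD (-1)
  termination_by fuel => (fuel, 0)

def pvFLoop (fav : List String) (m0 : PySem.Dict String Int) : Nat → List Char → Nat → Option Int → Option Int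
  | fuel, s, i, best =>
    if h : 0 < i ∧ i < s.length then
      let best' :=
        if fav.contains (String.ofList (s.take i)) then
          pvComb best (pvF fav m0 fuel (s.drop i))
        else best
      pvFLoop fav m0 fuel s (i + 1) best'
    else best
  termination_by fuel s i => (fuel, s.length + 1 - i)
  decreasing_by
  · exact Prod.Lex.right _ (by omega)
  · exact Prod.Lex.right _ (by omega)
end

def pvFv (fav : List String) (m0 : PySem.Dict String Int) (s : List Char) : Int :=
  pvF fav m0 (s.length + 1) s

theorem pvFLoop_congr (fav : List String) (m0 : PySem.Dict String Int) (f f' : Nat) (s : List Char)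
    (H : ∀ j, 0 < j → j < s.length → pvF fav m0 f (s.drop j) = pvF fav m0 f' (s.drop j)) :
    ∀ (d i : Nat), s.length ≤ i + d → ∀ (best : Option Int),
      pvFLoop fav m0 f s i best = pvFLoop fav m0 f' s i best := by
  intro d
  induction d with
  | zero =>
    intro i hd best
    conv_lhs => rw [pvFLoop]
    conv_rhs => rw [pvFLoop]
    have : ¬ (0 < i ∧ i < s.length) := by omega
    simp only [this, dif_neg, not_false_iff]
  | succ d ihd =>
    intro i hd best
    by_cases hg : 0 < i ∧ i < s.length
    · conv_lhs => rw [pvFLoop]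
      conv_rhs => rw [pvFLoop]
      simp only [hg, dif_pos, and_true]
      rw [H i hg.1 hg.2]
      exact ihd (i + 1) (by omega) _
    · conv_lhs => rw [pvFLoop]
      conv_rhs => rw [pvFLoop]
      simp only [hg, dif_neg, not_false_iff]

theorem pvF_congr (fav : List String) (m0 : PySem.Dict String Int) :
    ∀ (n fuel fuel' : Nat) (s : List Char), s.length ≤ n → s.length < fuel → s.length < fuel' →
      pvF fav m0 fuel s = pvF fav m0 fuel' s := by
  intro n
  induction n with
  | zero =>
    intro fuel fuel' s hn hf hf'
    match fuel, fuel' with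
    | f + 1, f' + 1 =>
      rw [pvF, pvF]
      have hL : pvFLoop fav m0 f s 1 none = pvFLoop fav m0 f' s 1 none :=
        pvFLoop_congr fav m0 f f' s (fun j hj hjs => by omega) s.length 1 (by omega) none
      rw [hL]
  | succ n ihn =>
    intro fuel fuel' s hn hf hf'
    match fuel, fuel' with
    | f + 1, f' + 1 =>
      rw [pvF, pvF]
      have hL : pvFLoop fav m0 f s 1 none = pvFLoop fav m0 f' s 1 none := by
        refine pvFLoop_congr fav m0 f f' s (fun j hj hjs => ?_) s.length 1 (by omega) none
        exact ihn f f' (s.drop j) (by simp; omega) (by simp; omega) (by simp; omega)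
      rw [hL]

theorem pvLenOf (l : List Char) : (String.ofList l).toList.length = l.length := by simp

theorem pvNeOf {l l' : List Char} (h : l.length ≠ l'.length) : String.ofList l ≠ String.ofList l' := by
  intro he
  exact h (by rw [← pvLenOf l, ← pvLenOf l', he])

theorem pvFoldA_main (f : Nat) (fav : List String) (m0 : PySem.Dict String Int) (pi : List Char)
    (HIH : ∀ (s : List Char), s.length < pi.length → ∀ (m : PySem.Dict String Int),
      (∀ k, (m0.get? k).isSome = true → (m.get? k).isSome = true) →
      (∀ k v, m.get? k = some v → s.length < k.toList.length ∨ m0.get? k = some v ∨ v = pvFv fav m0 k.toList) →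
      (pvCallA f fav s m).1 = pvFv fav m0 s
      ∧ (∀ k, s.length < k.toList.length → (pvCallA f fav s m).2.get? k = m.get? k)
      ∧ (∀ k v, (pvCallA f fav s m).2.get? k = some v →
          m.get? k = some v ∨ (k.toList.length ≤ s.length ∧ (m0.get? k = some v ∨ v = pvFv fav m0 k.toList)))
      ∧ (∀ k, (m0.get? k).isSome = true → ((pvCallA f fav s m).2.get? k).isSome = true)) :
    ∀ (d i : Nat), pi.length ≤ i + d → 1 ≤ i → ∀ (m : PySem.Dict String Int) (best : Option Int),
      m.get? (String.ofList pi) = best →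
      (∀ k, (m0.get? k).isSome = true → (m.get? k).isSome = true) →
      (∀ k v, m.get? k = some v → pi.length < k.toList.length ∨ k = String.ofList pi ∨ m0.get? k = some v ∨ v = pvFv fav m0 k.toList) →
      (((PySem.List.pyRange (i : Int) ((pi.length : Nat) : Int) 1).foldl (fun m i =>
            if fav.contains (String.ofList (PySem.List.slice pi none (some i))) then
              let r := pvCallA f fav (PySem.List.slice pi (some i) none) m
              let m1 := r.2.insert (String.ofList (PySem.List.slice pi (some i) none)) r.1
              let t := m1.getD (String.ofList (PySem.List.slice pi (some i) none)) 0
              if t ≠ -1 then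
                match m1.get? (String.ofList pi) with
                | some v => if v ≠ -1 then m1.insert (String.ofList pi) (min v (t + 1))
                            else m1.insert (String.ofList pi) (t + 1)
                | none => m1.insert (String.ofList pi) (t + 1)
              else
                match m1.get? (String.ofList pi) with
                | some v => m1.insert (String.ofList pi) v
                | none => m1.insert (String.ofList pi) (-1)
            else m) m).get? (String.ofList pi)) = pvFLoop fav m0 pi.length pi i best
      ∧ (∀ k, pi.length < k.toList.length → (((PySem.List.pyRange (i : Int) ((pi.length : Nat) : Int) 1).foldl (fun m i =>
            if fav.contains (String.ofList (PySem.List.slice pi none (some i))) then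
              let r := pvCallA f fav (PySem.List.slice pi (some i) none) m
              let m1 := r.2.insert (String.ofList (PySem.List.slice pi (some i) none)) r.1
              let t := m1.getD (String.ofList (PySem.List.slice pi (some i) none)) 0
              if t ≠ -1 then
                match m1.get? (String.ofList pi) with
                | some v => if v ≠ -1 then m1.insert (String.ofList pi) (min v (t + 1))
                            else m1.insert (String.ofList pi) (t + 1)
                | none => m1.insert (String.ofList pi) (t + 1)
              else
                match m1.get? (String.ofList pi) with
                | some v => m1.insert (String.ofList pi) v
                | none => m1.insert (String.ofList pi) (-1)
            else m) m).get? k) = m.get? k)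
      ∧ (∀ k v, (((PySem.List.pyRange (i : Int) ((pi.length : Nat) : Int) 1).foldl (fun m i =>
            if fav.contains (String.ofList (PySem.List.slice pi none (some i))) then
              let r := pvCallA f fav (PySem.List.slice pi (some i) none) m
              let m1 := r.2.insert (String.ofList (PySem.List.slice pi (some i) none)) r.1
              let t := m1.getD (String.ofList (PySem.List.slice pi (some i) none)) 0
              if t ≠ -1 then
                match m1.get? (String.ofList pi) with
                | some v => if v ≠ -1 then m1.insert (String.ofList pi) (min v (t + 1))
                            else m1.insert (String.ofList pi) (t + 1)
                | none => m1.insert (String.ofList pi) (t + 1)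
              else
                match m1.get? (String.ofList pi) with
                | some v => m1.insert (String.ofList pi) v
                | none => m1.insert (String.ofList pi) (-1)
            else m) m).get? k) = some v →
          m.get? k = some v ∨ (k.toList.length ≤ pi.length ∧ (k = String.ofList pi ∨ m0.get? k = some v ∨ v = pvFv fav m0 k.toList)))
      ∧ (∀ k, (m0.get? k).isSome = true → ((((PySem.List.pyRange (i : Int) ((pi.length : Nat) : Int) 1).foldl (fun m i =>
            if fav.contains (String.ofList (PySem.List.slice pi none (some i))) then
              let r := pvCallA f fav (PySem.List.slice pi (some i) none) m
              let m1 := r.2.insert (String.ofList (PySem.List.slice pi (some i) none)) r.1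
              let t := m1.getD (String.ofList (PySem.List.slice pi (some i) none)) 0
              if t ≠ -1 then
                match m1.get? (String.ofList pi) with
                | some v => if v ≠ -1 then m1.insert (String.ofList pi) (min v (t + 1))
                            else m1.insert (String.ofList pi) (t + 1)
                | none => m1.insert (String.ofList pi) (t + 1)
              else
                match m1.get? (String.ofList pi) with
                | some v => m1.insert (String.ofList pi) v
                | none => m1.insert (String.ofList pi) (-1)
            else m) m).get? k).isSome = true)) := by
  intro d
  induction d with
  | zero =>
    intro i hdi h1 m best hbest hSub hInv
    rw [pvFLoop]
    have hg : ¬ (0 < i ∧ i < pi.length) := by omega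
    rw [dif_neg hg]
    rw [PySem.List.pyRange_one_eq_nil (by exact_mod_cast Nat.le_of_lt_succ (by omega))]
    exact ⟨hbest, fun k _ => rfl, fun k v h => Or.inl h, fun k h => hSub k h⟩
  | succ d ihd =>
    intro i hdi h1 m best hbest hSub hInv
    by_cases hi : i < pi.length
    · have hg : 0 < i ∧ i < pi.length := ⟨h1, hi⟩
      rw [pvFLoop, dif_pos hg]
      rw [PySem.List.pyRange_one_cons (by exact_mod_cast hi)]
      simp only [List.foldl_cons]
      rw [show ((i : Int) + 1) = (((i + 1 : Nat) : Nat) : Int) from by push_cast; ring]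
      simp only [PySem.List.slice_to_natCast, PySem.List.slice_from_natCast]
      have hsuflt : (pi.drop i).length < pi.length := by simp; omega
      have hInvSuf : ∀ k v, m.get? k = some v →
          (pi.drop i).length < k.toList.length ∨ m0.get? k = some v ∨ v = pvFv fav m0 k.toList := by
        intro k v h
        rcases hInv k v h with h' | h' | h' | h'
        · exact Or.inl (by omega)
        · refine Or.inl ?_
          rw [h', pvLenOf]
          omega
        · exact Or.inr (Or.inl h')
        · exact Or.inr (Or.inr h')
      obtain ⟨hA1, hA2, hA3, hA4⟩ := HIH (pi.drop i) hsuflt m hSub hInvSuf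
      by_cases hfavp : fav.contains (String.ofList (pi.take i))
      · simp only [hfavp, if_true]
        set r := pvCallA f fav (pi.drop i) m with hr
        set sufS := String.ofList (pi.drop i) with hsufS
        set piS := String.ofList pi with hpiS
        have hnsp : sufS ≠ piS := pvNeOf (by simp; omega)
        have hnps : piS ≠ sufS := fun e => hnsp e.symm
        set m1 := r.2.insert sufS r.1 with hm1
        have ht : m1.getD sufS 0 = r.1 := PySem.Dict.getD_insert_self _ _ _ _
        have hr2pi : r.2.get? piS = m.get? piS := hA2 piS (by rw [hpiS, pvLenOf]; omega)
        have hm1pi : m1.get? piS = best := by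
          rw [hm1, PySem.Dict.get?_insert_of_ne _ _ hnps, hr2pi]
          exact hbest
        have hFsuf : pvF fav m0 pi.length (pi.drop i) = pvFv fav m0 (pi.drop i) := by
          unfold pvFv
          exact pvF_congr fav m0 (pi.drop i).length pi.length ((pi.drop i).length + 1) _ le_rfl
            (by omega) (by omega)
        have main : ∀ (w : Int),
            (((PySem.List.pyRange ((i + 1 : Nat) : Int) ((pi.length : Nat) : Int) 1).foldl (fun m i =>
                if fav.contains (String.ofList (PySem.List.slice pi none (some i))) then
                  let r := pvCallA f fav (PySem.List.slice pi (some i) none) m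
                  let m1 := r.2.insert (String.ofList (PySem.List.slice pi (some i) none)) r.1
                  let t := m1.getD (String.ofList (PySem.List.slice pi (some i) none)) 0
                  if t ≠ -1 then
                    match m1.get? (String.ofList pi) with
                    | some v => if v ≠ -1 then m1.insert (String.ofList pi) (min v (t + 1))
                                else m1.insert (String.ofList pi) (t + 1)
                    | none => m1.insert (String.ofList pi) (t + 1)
                  else
                    match m1.get? (String.ofList pi) with
                    | some v => m1.insert (String.ofList pi) v
                    | none => m1.insert (String.ofList pi) (-1)
                else m) (m1.insert piS w)).get? piS)
                = pvFLoop fav m0 pi.length pi (i + 1) (some w)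
            ∧ (∀ k, pi.length < k.toList.length →
                (((PySem.List.pyRange ((i + 1 : Nat) : Int) ((pi.length : Nat) : Int) 1).foldl (fun m i =>
                if fav.contains (String.ofList (PySem.List.slice pi none (some i))) then
                  let r := pvCallA f fav (PySem.List.slice pi (some i) none) m
                  let m1 := r.2.insert (String.ofList (PySem.List.slice pi (some i) none)) r.1
                  let t := m1.getD (String.ofList (PySem.List.slice pi (some i) none)) 0
                  if t ≠ -1 then
                    match m1.get? (String.ofList pi) with
                    | some v => if v ≠ -1 then m1.insert (String.ofList pi) (min v (t + 1))
                                else m1.insert (String.ofList pi) (t + 1)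
                    | none => m1.insert (String.ofList pi) (t + 1)
                  else
                    match m1.get? (String.ofList pi) with
                    | some v => m1.insert (String.ofList pi) v
                    | none => m1.insert (String.ofList pi) (-1)
                else m) (m1.insert piS w)).get? k) = m.get? k)
            ∧ (∀ k v, (((PySem.List.pyRange ((i + 1 : Nat) : Int) ((pi.length : Nat) : Int) 1).foldl (fun m i =>
                if fav.contains (String.ofList (PySem.List.slice pi none (some i))) then
                  let r := pvCallA f fav (PySem.List.slice pi (some i) none) m
                  let m1 := r.2.insert (String.ofList (PySem.List.slice pi (some i) none)) r.1
                  let t := m1.getD (String.ofList (PySem.List.slice pi (some i) none)) 0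
                  if t ≠ -1 then
                    match m1.get? (String.ofList pi) with
                    | some v => if v ≠ -1 then m1.insert (String.ofList pi) (min v (t + 1))
                                else m1.insert (String.ofList pi) (t + 1)
                    | none => m1.insert (String.ofList pi) (t + 1)
                  else
                    match m1.get? (String.ofList pi) with
                    | some v => m1.insert (String.ofList pi) v
                    | none => m1.insert (String.ofList pi) (-1)
                else m) (m1.insert piS w)).get? k) = some v →
                m.get? k = some v ∨ (k.toList.length ≤ pi.length ∧
                  (k = piS ∨ m0.get? k = some v ∨ v = pvFv fav m0 k.toList)))
            ∧ (∀ k, (m0.get? k).isSome = true →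
                ((((PySem.List.pyRange ((i + 1 : Nat) : Int) ((pi.length : Nat) : Int) 1).foldl (fun m i =>
                if fav.contains (String.ofList (PySem.List.slice pi none (some i))) then
                  let r := pvCallA f fav (PySem.List.slice pi (some i) none) m
                  let m1 := r.2.insert (String.ofList (PySem.List.slice pi (some i) none)) r.1
                  let t := m1.getD (String.ofList (PySem.List.slice pi (some i) none)) 0
                  if t ≠ -1 then
                    match m1.get? (String.ofList pi) with
                    | some v => if v ≠ -1 then m1.insert (String.ofList pi) (min v (t + 1))
                                else m1.insert (String.ofList pi) (t + 1)
                    | none => m1.insert (String.ofList pi) (t + 1)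
                  else
                    match m1.get? (String.ofList pi) with
                    | some v => m1.insert (String.ofList pi) v
                    | none => m1.insert (String.ofList pi) (-1)
                else m) (m1.insert piS w)).get? k).isSome = true)) := by
          intro w
          have h2best : (m1.insert piS w).get? piS = some w := PySem.Dict.get?_insert_self _ _ _
          have h2Sub : ∀ k, (m0.get? k).isSome = true → ((m1.insert piS w).get? k).isSome = true := by
            intro k hk
            by_cases hk1 : k = piS
            · rw [hk1, PySem.Dict.get?_insert_self]; simp
            · rw [PySem.Dict.get?_insert_of_ne _ _ hk1]
              by_cases hk2 : k = sufS
              · rw [hk2, hm1, PySem.Dict.get?_insert_self]; simp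
              · rw [hm1, PySem.Dict.get?_insert_of_ne _ _ hk2]
                exact hA4 k hk
          have h2Inv : ∀ k v, (m1.insert piS w).get? k = some v →
              pi.length < k.toList.length ∨ k = piS ∨ m0.get? k = some v ∨ v = pvFv fav m0 k.toList := by
            intro k v hkv
            by_cases hk1 : k = piS
            · exact Or.inr (Or.inl hk1)
            rw [PySem.Dict.get?_insert_of_ne _ _ hk1] at hkv
            by_cases hk2 : k = sufS
            · rw [hk2, hm1, PySem.Dict.get?_insert_self] at hkv
              have : v = r.1 := by injection hkv.symm
              refine Or.inr (Or.inr (Or.inr ?_))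
              rw [this, hA1, hk2, hsufS, String.toList_ofList]
            · rw [hm1, PySem.Dict.get?_insert_of_ne _ _ hk2] at hkv
              rcases hA3 k v hkv with h' | ⟨hlen, h'⟩
              · exact hInv k v h'
              · exact Or.inr (Or.inr h')
          obtain ⟨c1, c2, c3, c4⟩ := ihd (i + 1) (by omega) (by omega) (m1.insert piS w) (some w)
            h2best h2Sub h2Inv
          refine ⟨c1, ?_, ?_, c4⟩
          · intro k hk
            have hkp : k ≠ piS := by
              intro e; rw [e, hpiS, pvLenOf] at hk; omega
            have hks : k ≠ sufS := by
              intro e; rw [e, hsufS, pvLenOf] at hk; simp at hk; omega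
            rw [c2 k hk, PySem.Dict.get?_insert_of_ne _ _ hkp, hm1,
              PySem.Dict.get?_insert_of_ne _ _ hks]
            exact hA2 k (by omega)
          · intro k v hkv
            rcases c3 k v hkv with h | hR
            · by_cases hk1 : k = piS
              · exact Or.inr ⟨by rw [hk1, hpiS, pvLenOf], Or.inl hk1⟩
              rw [PySem.Dict.get?_insert_of_ne _ _ hk1] at h
              by_cases hk2 : k = sufS
              · rw [hk2, hm1, PySem.Dict.get?_insert_self] at h
                have hv : v = r.1 := by injection h.symm
                refine Or.inr ⟨by rw [hk2, hsufS, pvLenOf]; omega, Or.inr (Or.inr ?_)⟩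
                rw [hv, hA1, hk2, hsufS, String.toList_ofList]
              · rw [hm1, PySem.Dict.get?_insert_of_ne _ _ hk2] at h
                rcases hA3 k v h with h' | ⟨hlen, h'⟩
                · exact Or.inl h'
                · exact Or.inr ⟨by omega, Or.inr h'⟩
            · exact Or.inr hR
        rw [hFsuf, ← hA1, hm1pi, ht]
        rcases best with _ | v
        · by_cases hr1 : r.1 = -1
          · rw [show pvComb none r.1 = some (-1) from by simp [pvComb, hr1]]
            simp only [hr1, ne_eq, not_true_eq_false, if_false]
            exact main (-1)
          · rw [show pvComb none r.1 = some (r.1 + 1) from by simp [pvComb, hr1]]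
            simp only [ne_eq, hr1, not_false_eq_true, if_true]
            exact main (r.1 + 1)
        · by_cases hr1 : r.1 = -1
          · rw [show pvComb (some v) r.1 = some v from by simp [pvComb, hr1]]
            simp only [hr1, ne_eq, not_true_eq_false, if_false]
            exact main v
          · by_cases hv : v = -1
            · rw [show pvComb (some v) r.1 = some (r.1 + 1) from by simp [pvComb, hr1, hv]]
              simp only [ne_eq, hr1, not_false_eq_true, if_true, hv, not_true_eq_false, if_false]
              exact main (r.1 + 1)
            · rw [show pvComb (some v) r.1 = some (min v (r.1 + 1)) from by simp [pvComb, hr1, hv]]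
              simp only [ne_eq, hr1, not_false_eq_true, if_true, hv]
              exact main (min v (r.1 + 1))
      · simp only [hfavp, Bool.false_eq_true, if_false]
        exact ihd (i + 1) (by omega) (by omega) m best hbest hSub hInv
    · have hg : ¬ (0 < i ∧ i < pi.length) := by omega
      rw [pvFLoop, dif_neg hg]
      rw [PySem.List.pyRange_one_eq_nil (by exact_mod_cast (by omega : pi.length ≤ i))]
      exact ⟨hbest, fun k _ => rfl, fun k v h => Or.inl h, fun k h => hSub k h⟩

theorem pvCallA_main (fav : List String) (m0 : PySem.Dict String Int) :
    ∀ (n : Nat) (pi : List Char), pi.length < n → ∀ (f : Nat), pi.length < f →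
      ∀ (m : PySem.Dict String Int),
      (∀ k, (m0.get? k).isSome = true → (m.get? k).isSome = true) →
      (∀ k v, m.get? k = some v → pi.length < k.toList.length ∨ m0.get? k = some v ∨ v = pvFv fav m0 k.toList) →
      (pvCallA f fav pi m).1 = pvFv fav m0 pi
      ∧ (∀ k, pi.length < k.toList.length → (pvCallA f fav pi m).2.get? k = m.get? k)
      ∧ (∀ k v, (pvCallA f fav pi m).2.get? k = some v →
          m.get? k = some v ∨ (k.toList.length ≤ pi.length ∧ (m0.get? k = some v ∨ v = pvFv fav m0 k.toList)))
      ∧ (∀ k, (m0.get? k).isSome = true → ((pvCallA f fav pi m).2.get? k).isSome = true) := by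
  intro n
  induction n with
  | zero => intro pi h; omega
  | succ n ihn =>
    intro pi hlen f hf m hSub hInv
    match f, hf with
    | fuel + 1, hf =>
    rw [pvCallA]
    by_cases hfav : fav.contains (String.ofList pi)
    · rw [if_pos hfav]
      refine ⟨?_, fun k _ => rfl, fun k v h => Or.inl h, fun k h => hSub k h⟩
      show (0 : Int) = pvFv fav m0 pi
      unfold pvFv
      rw [pvF, if_pos hfav]
    · rw [if_neg hfav]
      cases hget : m.get? (String.ofList pi) with
      | some v =>
        refine ⟨?_, fun k _ => rfl, fun k v h => Or.inl h, fun k h => hSub k h⟩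
        show v = pvFv fav m0 pi
        rcases hInv (String.ofList pi) v hget with h' | h' | h'
        · rw [pvLenOf] at h'; omega
        · unfold pvFv
          rw [pvF, if_neg hfav, h']
        · rw [h', String.toList_ofList]
      | none =>
        have hm0 : m0.get? (String.ofList pi) = none := by
          cases h0 : m0.get? (String.ofList pi) with
          | none => rfl
          | some w =>
            have := hSub (String.ofList pi) (by rw [h0]; rfl)
            rw [hget] at this; simp at this
        by_cases hlen1 : pi.length = 1
        · rw [if_pos hlen1]
          refine ⟨?_, fun k _ => rfl, fun k v h => Or.inl h, fun k h => hSub k h⟩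
          show (if fav.contains (String.ofList pi) then (0 : Int) else -1) = pvFv fav m0 pi
          rw [if_neg hfav]
          unfold pvFv
          rw [pvF, if_neg hfav, hm0, if_pos hlen1]
        · rw [if_neg hlen1]
          have HIH : ∀ (s : List Char), s.length < pi.length → ∀ (m' : PySem.Dict String Int),
              (∀ k, (m0.get? k).isSome = true → (m'.get? k).isSome = true) →
              (∀ k v, m'.get? k = some v → s.length < k.toList.length ∨ m0.get? k = some v ∨ v = pvFv fav m0 k.toList) →
              (pvCallA fuel fav s m').1 = pvFv fav m0 s
              ∧ (∀ k, s.length < k.toList.length → (pvCallA fuel fav s m').2.get? k = m'.get? k)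
              ∧ (∀ k v, (pvCallA fuel fav s m').2.get? k = some v →
                  m'.get? k = some v ∨ (k.toList.length ≤ s.length ∧ (m0.get? k = some v ∨ v = pvFv fav m0 k.toList)))
              ∧ (∀ k, (m0.get? k).isSome = true → ((pvCallA fuel fav s m').2.get? k).isSome = true) := by
            intro s hs m' hS hI
            exact ihn s (by omega) fuel (by omega) m' hS hI
          have hInvL : ∀ k v, m.get? k = some v →
              pi.length < k.toList.length ∨ k = String.ofList pi ∨ m0.get? k = some v ∨ v = pvFv fav m0 k.toList := by
            intro k v h
            rcases hInv k v h with h' | h' | h'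
            · exact Or.inl h'
            · exact Or.inr (Or.inr (Or.inl h'))
            · exact Or.inr (Or.inr (Or.inr h'))
          obtain ⟨c1, c2, c3, c4⟩ := pvFoldA_main fuel fav m0 pi HIH pi.length 1 (by omega) le_rfl
            m none hget hSub hInvL
          have hFpi : pvFv fav m0 pi = (pvFLoop fav m0 pi.length pi 1 none).getD (-1) := by
            unfold pvFv
            rw [pvF, if_neg hfav, hm0, if_neg hlen1]
          rw [PySem.List.len_eq]
          have c1' : ((PySem.List.pyRange 1 (pi.length : Int) 1).foldl _ m).get? (String.ofList pi)
              = pvFLoop fav m0 pi.length pi 1 none := c1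
          refine ⟨?_, c2, ?_, c4⟩
          · show ((PySem.List.pyRange 1 (pi.length : Int) 1).foldl _ m).getD (String.ofList pi) (-1)
              = pvFv fav m0 pi
            rw [PySem.Dict.getD_eq_get?_getD, c1', hFpi]
          · intro k v hkv
            rcases c3 k v hkv with h | ⟨hl, h | h | h⟩
            · exact Or.inl h
            · refine Or.inr ⟨hl, Or.inr ?_⟩
              have hthis : ((PySem.List.pyRange 1 (pi.length : Int) 1).foldl _ m).get? k
                  = some v := hkv
              rw [h] at hthis
              rw [c1'] at hthis
              rw [h, String.toList_ofList, hFpi, hthis]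
              rfl
            · exact Or.inr ⟨hl, Or.inl h⟩
            · exact Or.inr ⟨hl, Or.inr h⟩

-- ===== B-side lemmas =====

theorem pvSetContains (xs : List String) (x : String) :
    PySem.Set.contains (PySem.Set.ofList xs) x = xs.contains x := by
  simp [PySem.Set.contains_eq_listContains]

theorem pvGetMem (l : List (String × Int)) (k : String) (v : Int)
    (h : (PySem.Dict.mk l).get? k = some v) : (k, v) ∈ l := by
  induction l with
  | nil => simp [PySem.Dict.get?] at h
  | cons p rest ih =>
    obtain ⟨k', v'⟩ := p
    rw [PySem.Dict.get?_mk_cons] at h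
    by_cases he : k' == k
    · rw [if_pos he] at h
      have h1 : k' = k := by simpa using he
      have h2 : v' = v := by injection h
      subst h1; subst h2
      exact List.mem_cons_self ..
    · rw [if_neg he] at h
      exact List.mem_cons_of_mem _ (ih h)

-- the candidate list of A's split loop, as a pure list (proof-side only)
def pvCand (fav : List String) (m0 : PySem.Dict String Int) (s : List Char) (i : Nat) : List Int :=
  (List.range' i (s.length - i)).filterMap (fun j =>
    if fav.contains (String.ofList (s.take j)) && (pvFv fav m0 (s.drop j) != -1)
    then some (pvFv fav m0 (s.drop j) + 1) else none)

def pvNorm : Option Int → List Int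
  | none => []
  | some v => if v = -1 then [] else [v]

theorem pvCand_nil (fav : List String) (m0 : PySem.Dict String Int) (s : List Char) (i : Nat)
    (h : s.length ≤ i) : pvCand fav m0 s i = [] := by
  unfold pvCand
  rw [show s.length - i = 0 from by omega]
  rfl

theorem pvCand_cons (fav : List String) (m0 : PySem.Dict String Int) (s : List Char) (i : Nat)
    (h : i < s.length) :
    pvCand fav m0 s i =
      (if fav.contains (String.ofList (s.take i)) && (pvFv fav m0 (s.drop i) != -1)
       then some (pvFv fav m0 (s.drop i) + 1) else none).toList ++ pvCand fav m0 s (i + 1) := by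
  unfold pvCand
  rw [show s.length - i = (s.length - (i + 1)) + 1 from by omega, List.range'_succ,
    List.filterMap_cons]
  split <;> simp_all

theorem pvFLoop_min (fav : List String) (m0 : PySem.Dict String Int) (s : List Char)
    (Hge : ∀ j, 0 < j → j < s.length → -1 ≤ pvFv fav m0 (s.drop j)) :
    ∀ (d i : Nat), s.length ≤ i + d → 0 < i → ∀ (b : Option Int),
      (pvFLoop fav m0 s.length s i b).getD (-1)
        = ((pvNorm b) ++ pvCand fav m0 s i).min?.getD (-1) := by
  intro d
  induction d with
  | zero =>
    intro i hd h0 b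
    rw [pvFLoop, dif_neg (by omega : ¬ (0 < i ∧ i < s.length)), pvCand_nil fav m0 s i (by omega)]
    rcases b with _ | v
    · rfl
    · by_cases hv : v = -1 <;> simp [pvNorm, hv]
  | succ d ihd =>
    intro i hd h0 b
    by_cases hi : i < s.length
    · rw [pvFLoop, dif_pos (⟨h0, hi⟩ : 0 < i ∧ i < s.length), pvCand_cons fav m0 s i hi]
      have hF : pvF fav m0 s.length (s.drop i) = pvFv fav m0 (s.drop i) := by
        unfold pvFv
        exact pvF_congr fav m0 (s.drop i).length s.length ((s.drop i).length + 1) _ le_rfl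
          (by simp; omega) (by omega)
      set t := pvFv fav m0 (s.drop i) with hts
      have htge : -1 ≤ t := Hge i h0 hi
      by_cases hfavp : fav.contains (String.ofList (s.take i))
      · simp only [hfavp, if_true, hF, Bool.true_and]
        by_cases ht1 : t = -1
        · rw [show (t != -1) = false from by simp [ht1]]
          simp only [Bool.false_eq_true, if_false, Option.toList_none, List.nil_append]
          rcases b with _ | v
          · rw [show pvComb none t = some (-1) from by simp [pvComb, ht1]]
            rw [ihd (i + 1) (by omega) (by omega) (some (-1))]
            simp [pvNorm]
          · rw [show pvComb (some v) t = some v from by simp [pvComb, ht1]]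
            exact ihd (i + 1) (by omega) (by omega) (some v)
        · rw [show (t != -1) = true from by simp [ht1]]
          simp only [if_true, Option.toList_some]
          rcases b with _ | v
          · rw [show pvComb none t = some (t + 1) from by simp [pvComb, ht1],
              ihd (i + 1) (by omega) (by omega) (some (t + 1))]
            simp [pvNorm, show ¬ t + 1 = -1 from by omega]
          · by_cases hv : v = -1
            · rw [show pvComb (some v) t = some (t + 1) from by simp [pvComb, ht1, hv],
                ihd (i + 1) (by omega) (by omega) (some (t + 1))]
              simp [pvNorm, hv, show ¬ t + 1 = -1 from by omega]
            · rw [show pvComb (some v) t = some (min v (t + 1)) from by simp [pvComb, ht1, hv],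
                ihd (i + 1) (by omega) (by omega) (some (min v (t + 1)))]
              have hmne : ¬ min v (t + 1) = -1 := by
                by_cases hle : v ≤ t + 1
                · rw [min_eq_left hle]; exact hv
                · rw [min_eq_right (by omega : t + 1 ≤ v)]; omega
              simp only [pvNorm, if_neg hmne, if_neg hv, List.cons_append, List.nil_append]
              rw [List.min?_cons', List.min?_cons']
              rfl
      · simp only [hfavp, Bool.false_eq_true, if_false, Bool.false_and]
        exact ihd (i + 1) (by omega) (by omega) b
    · rw [pvFLoop, dif_neg (by omega : ¬ (0 < i ∧ i < s.length)), pvCand_nil fav m0 s i (by omega)]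
      rcases b with _ | v
      · rfl
      · by_cases hv : v = -1 <;> simp [pvNorm, hv]

-- pvFv on a fav-miss, memo-miss suffix is the min of the candidate list (any length, incl. 0/1)
theorem pvFv_eq_cand (fav : List String) (m0 : PySem.Dict String Int) (s : List Char)
    (hfav : ¬ fav.contains (String.ofList s) = true)
    (hm : m0.get? (String.ofList s) = none)
    (Hge : ∀ j, 0 < j → j < s.length → -1 ≤ pvFv fav m0 (s.drop j)) :
    pvFv fav m0 s = (pvCand fav m0 s 1).min?.getD (-1) := by
  unfold pvFv
  rw [pvF, if_neg hfav, hm]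
  by_cases hlen1 : s.length = 1
  · rw [if_pos hlen1, pvCand_nil fav m0 s 1 (by omega)]
    rfl
  · rw [if_neg hlen1]
    have hL : pvFLoop fav m0 s.length s 1 none = pvFLoop fav m0 (s.length + 1 - 1) s 1 none := by
      rfl
    have := pvFLoop_min fav m0 s Hge s.length 1 (by omega) (by omega) none
    rw [this]
    rfl

theorem pvFv_ge (fav : List String) (m0 : PySem.Dict String Int) (l : List Char)
    (Hm : ∀ k v, m0.get? (String.ofList k) = some v → k ≠ [] → k.length < l.length →
      k <:+ l → -1 ≤ v) :
    ∀ (n : Nat) (s : List Char), s.length ≤ n → s ≠ [] → s.length < l.length → s <:+ l →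
      -1 ≤ pvFv fav m0 s := by
  intro n
  induction n with
  | zero =>
    intro s hn hne _ _
    cases s with
    | nil => exact absurd rfl hne
    | cons a t => simp at hn
  | succ n ihn =>
    intro s hn hne hlt hsuf
    by_cases hfav : fav.contains (String.ofList s) = true
    · unfold pvFv; rw [pvF, if_pos hfav]; omega
    · cases hm : m0.get? (String.ofList s) with
      | some v =>
        have : pvFv fav m0 s = v := by unfold pvFv; rw [pvF, if_neg hfav, hm]
        rw [this]
        exact Hm s v hm hne hlt hsuf
      | none =>
        have Hge : ∀ j, 0 < j → j < s.length → -1 ≤ pvFv fav m0 (s.drop j) := by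
          intro j hj hjs
          refine ihn (s.drop j) (by simp; omega) ?_ (by simp; omega)
            ((List.drop_suffix j s).trans hsuf)
          intro he
          have : s.length - j = 0 := by rw [← List.length_drop, he]; rfl
          omega
        rw [pvFv_eq_cand fav m0 s hfav hm Hge]
        cases hmin : (pvCand fav m0 s 1).min? with
        | none => simp
        | some a =>
          have ha : a ∈ pvCand fav m0 s 1 := List.min?_mem hmin
          unfold pvCand at ha
          rw [List.mem_filterMap] at ha
          obtain ⟨j, hj, hja⟩ := ha
          by_cases hc : fav.contains (String.ofList (s.take j)) && (pvFv fav m0 (s.drop j) != -1)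
          · rw [if_pos hc] at hja
            have hjr : 1 ≤ j ∧ j < s.length := by
              have := List.mem_range'.mp hj
              omega
            have := Hge j (by omega) hjr.2
            have hane : pvFv fav m0 (s.drop j) ≠ -1 := by
              simpa using (Bool.and_elim_right hc)
            have : a = pvFv fav m0 (s.drop j) + 1 := by injection hja.symm
            simp only [Option.getD_some]
            omega
          · rw [if_neg hc] at hja
            exact absurd hja (by simp)

-- B's per-position value equals pvFv when the cache already holds the later suffix values
theorem pvBVal_eq (favNumbers : List String) (m0 : PySem.Dict String Int) (s : List Char)
    (cache : List Int)
    (Hc : ∀ k, k < s.length - 1 → cache[k]? = some (pvFv favNumbers m0 (s.drop (k + 1))))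
    (Hge : ∀ j, 0 < j → j < s.length → -1 ≤ pvFv favNumbers m0 (s.drop j)) :
    pvBVal (PySem.Set.ofList favNumbers) m0 s cache = pvFv favNumbers m0 s := by
  unfold pvBVal
  rw [pvSetContains]
  by_cases hfav : favNumbers.contains (String.ofList s) = true
  · rw [if_pos hfav]
    unfold pvFv
    rw [pvF, if_pos hfav]
  · rw [if_neg hfav]
    cases hm : m0.get? (String.ofList s) with
    | some v =>
      unfold pvFv
      rw [pvF, if_neg hfav, hm]
    | none =>
      rw [pvFv_eq_cand favNumbers m0 s hfav hm Hge]
      have hopts : (List.range (s.length - 1)).filterMap (fun k =>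
          match cache[k]? with
          | some t =>
            if PySem.Set.contains (PySem.Set.ofList favNumbers) (String.ofList (s.take (k + 1)))
                && (t != -1)
            then some (t + 1) else none
          | none => none) = pvCand favNumbers m0 s 1 := by
        unfold pvCand
        rw [List.range'_eq_map_range, List.filterMap_map]
        refine List.filterMap_congr ?_
        intro k hk
        have hk' : k < s.length - 1 := by simpa using hk
        rw [Hc k hk']
        simp only [Function.comp_apply, pvSetContains]
        rw [show 1 + k = k + 1 from by omega]
      rw [hopts]

-- the bottom-up loop fills the whole table of suffix values
theorem pvBBuild_eq (favNumbers : List String) (m0 : PySem.Dict String Int) (l : List Char)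
    (Hge : ∀ s : List Char, s ≠ [] → s.length < l.length → s <:+ l → -1 ≤ pvFv favNumbers m0 s) :
    ∀ (k : Nat) (cache : List Int), k ≤ l.length + 1 →
      cache = (List.range (l.length + 1 - k)).map (fun idx => pvFv favNumbers m0 (l.drop (k + idx))) →
      pvBBuild (PySem.Set.ofList favNumbers) m0 l k cache
        = (List.range (l.length + 1)).map (fun idx => pvFv favNumbers m0 (l.drop idx)) := by
  intro k
  induction k with
  | zero =>
    intro cache hk hc
    rw [pvBBuild, hc]
    simp
  | succ k ihk =>
    intro cache hk hc
    rw [pvBBuild]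
    have hval : pvBVal (PySem.Set.ofList favNumbers) m0 (l.drop k) cache
        = pvFv favNumbers m0 (l.drop k) := by
      refine pvBVal_eq favNumbers m0 (l.drop k) cache ?_ ?_
      · intro j hj
        have hjlen : j < l.length - k - 1 := by simpa using hj
        rw [hc]
        rw [List.getElem?_map, List.getElem?_range (by omega : j < l.length + 1 - (k + 1))]
        simp only [Option.map_some]
        rw [List.drop_drop, show k + (j + 1) = k + 1 + j from by omega]
      · intro j hj hjs
        rw [List.drop_drop]
        refine Hge (l.drop (k + j)) ?_ (by simp at hjs ⊢; omega) (List.drop_suffix _ _)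
        intro he
        have : l.length - (k + j) = 0 := by rw [← List.length_drop, he]; rfl
        simp at hjs
        omega
    rw [hval]
    refine ihk _ (by omega) ?_
    rw [hc, show l.length + 1 - k = (l.length + 1 - (k + 1)) + 1 from by omega,
      List.range_succ_eq_map]
    simp only [List.map_cons, List.map_map, Nat.add_zero, Function.comp_def]
    congr 1
    refine List.map_congr_left fun idx _ => ?_
    rw [show k + (idx + 1) = k + 1 + idx from by omega]

theorem pvAlt_eq_pvFv (pi : String) (favNumbers : List String) (minSplits : List (String × Int))
    (Hge : ∀ s : List Char, s ≠ [] → s.length < pi.toList.length → s <:+ pi.toList →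
      -1 ≤ pvFv favNumbers (PySem.Dict.mk minSplits) s) :
    numbersInPiHelper_alt pi favNumbers minSplits
      = pvFv favNumbers (PySem.Dict.mk minSplits) pi.toList := by
  unfold numbersInPiHelper_alt
  rw [pvBBuild_eq favNumbers (PySem.Dict.mk minSplits) pi.toList Hge (pi.toList.length + 1) []
    le_rfl (by simp)]
  rw [List.range_succ_eq_map]
  simp only [List.map_cons, List.drop_zero, List.headD_cons]

-- ===== VERDICT (by name: the statement is the Claim_ definition above) =====
theorem numbersInPiHelper_spec : Claim_equal_numbersInPiHelper := by
  intro pi favNumbers minSplits _ hpre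
  unfold Spec_numbersInPiHelper numbersInPiHelper
  have hA := (pvCallA_main favNumbers (PySem.Dict.mk minSplits) (pi.toList.length + 1) pi.toList
    (by omega) (pi.toList.length + 1) (by omega) (PySem.Dict.mk minSplits)
    (fun k h => h) (fun k v h => Or.inr (Or.inl h))).1
  have Hm : ∀ k v, (PySem.Dict.mk minSplits).get? (String.ofList k) = some v → k ≠ [] →
      k.length < pi.toList.length → k <:+ pi.toList → -1 ≤ v := by
    intro k v hkv hne hlt hsuf
    have hmem := pvGetMem minSplits (String.ofList k) v hkv
    have := hpre (String.ofList k, v) hmem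
    simp only [String.toList_ofList] at this
    exact this hne hlt hsuf
  have Hge : ∀ s : List Char, s ≠ [] → s.length < pi.toList.length → s <:+ pi.toList →
      -1 ≤ pvFv favNumbers (PySem.Dict.mk minSplits) s := fun s =>
    pvFv_ge favNumbers (PySem.Dict.mk minSplits) pi.toList Hm s.length s le_rfl
  rw [hA, pvAlt_eq_pvFv pi favNumbers minSplits Hge]
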